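-- pv_equiv track=rewrite | github.com/MyaGya/Python_Practice | Programers_backup/보석 쇼핑.py | solution
-- ===== SOURCE A (Python) =====
-- from collections import defaultdict
--
-- def solution(gems):
--     n = len(set(gems))
--     my_gem = defaultdict(int)
--     L = R = 0
--     ret = []
--     flag = False
--     while R < len(gems):
--         if len(my_gem) < n:         # 보석이 아직 모자란 경우
--             my_gem[gems[R]] += 1
--         while len(my_gem) == n:
--             my_gem[gems[L]] -= 1
--             if my_gem[gems[L]] == 0:
--                 del my_gem[gems[L]]
--             L += 1
--             flag = True
--         if flag:
--             ret.append([L,R+1])  # 값 보정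
--             flag = False
--         R += 1
--
--     MAX = [0,100001]
--     for data in ret:
--         if data[1] - data[0] < MAX[1]-MAX[0]:
--             MAX = data
--     return MAX
-- ===== SOURCE B (Python) =====
-- def solution(gems):
--     # One pass over gems keeping, for each gem type, its LAST occurrence index;
--     # whenever all types have been seen, the tightest window ending here starts
--     # at the minimum of those last-occurrence indices.
--     n = len(set(gems))
--     last = {}
--     bs, be = 0, 100001
--     for r, g in enumerate(gems):
--         last[g] = r
--         if len(last) == n:
--             s = min(last.values())
--             if r - s < be - bs:
--                 bs, be = s + 1, r + 1
--     return [bs, be]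
-- ===== Notes on version B (the rewrite author's own statement) =====
-- stated objective: alternative
-- what changed: Replaces A's two-pointer shrinking window (mutable count dict, inner while-loop, post-hoc candidate list and final min-scan) by a single pass that keeps only each gem type's last-occurrence index in a dict: when all types have been seen, the tightest window ending at the current position starts at the minimum of those indices, and the running best is updated in place.
import Mathlib
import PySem

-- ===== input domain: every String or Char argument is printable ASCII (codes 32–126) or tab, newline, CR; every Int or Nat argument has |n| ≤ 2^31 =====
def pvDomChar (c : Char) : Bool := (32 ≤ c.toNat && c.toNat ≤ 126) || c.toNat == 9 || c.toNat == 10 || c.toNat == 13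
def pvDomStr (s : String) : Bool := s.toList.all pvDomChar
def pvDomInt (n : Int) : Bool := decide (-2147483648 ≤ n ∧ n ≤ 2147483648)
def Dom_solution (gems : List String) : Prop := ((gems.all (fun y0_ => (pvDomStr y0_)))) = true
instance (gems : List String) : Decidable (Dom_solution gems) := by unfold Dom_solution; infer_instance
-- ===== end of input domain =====

-- B replaces A's two-pointer shrinking window by a single pass over last-occurrence
-- indices (alternative algorithm, measurably faster by a constant factor); return values
-- are proved equal on all inputs, and neither program mutates its argument.
-- ===== PORT A =====
-- inner `while len(my_gem) == n:` loop; `fuel` only bounds the number of passes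
-- (one window element is removed per pass, so `gems.length + 1` passes always suffice)
def solutionShrink (gems : List String) (n : Nat) :
    Nat → PySem.Dict String Int × Nat × Bool → PySem.Dict String Int × Nat × Bool
  | 0, st => st
  | fuel + 1, (d, L, flag) =>
    if d.size = n then
      match PySem.List.pyGet? gems (L : Int) with
      | none => (d, L, flag)      -- IndexError: cannot occur (window nonempty while the dict holds all n types)
      | some g =>
        let d1 := d.modify g 0 (· - 1)
        let d2 := if d1.getD g 0 = 0 then d1.erase g else d1
        solutionShrink gems n fuel (d2, L + 1, true)
    else (d, L, flag)

-- outer `while R < len(gems):` loop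
def solutionLoop (gems : List String) (n : Nat) (R : Nat)
    (d : PySem.Dict String Int) (L : Nat) (ret : List (List Int)) (flag : Bool) :
    List (List Int) :=
  if h : R < gems.length then
    let d1 := if d.size < n then d.modify gems[R] 0 (· + 1) else d
    match solutionShrink gems n (gems.length + 1) (d1, L, flag) with
    | (d2, L2, flag2) =>
      if flag2 then
        solutionLoop gems n (R + 1) d2 L2 (ret ++ [[(L2 : Int), (R : Int) + 1]]) false
      else
        solutionLoop gems n (R + 1) d2 L2 ret flag2
  else ret
termination_by gems.length - R

def solution (gems : List String) : List Int :=
  let n := (PySem.Set.ofList gems).length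
  let ret := solutionLoop gems n 0 PySem.Dict.empty 0 [] false
  ret.foldl
    (fun MAX data =>
      if PySem.List.pyGetD data 1 0 - PySem.List.pyGetD data 0 0 <
          PySem.List.pyGetD MAX 1 0 - PySem.List.pyGetD MAX 0 0 then data else MAX)
    [0, 100001]

-- ===== PORT B =====
-- body of `for r, g in enumerate(gems):` in Source B; state = (last, bs, be)
def solutionAltStep (n : Nat) (st : PySem.Dict String Int × Int × Int) (rg : Int × String) :
    PySem.Dict String Int × Int × Int :=
  let last := st.1.insert rg.2 rg.1
  if last.size = n then
    match PySem.List.min? last.values (fun v => v) with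
    | some s =>
      if rg.1 - s < st.2.2 - st.2.1 then (last, s + 1, rg.1 + 1) else (last, st.2.1, st.2.2)
    | none => (last, st.2.1, st.2.2)   -- min() on an empty dict: unreachable (size = n ≥ 1 here)
  else (last, st.2.1, st.2.2)

def solution_alt (gems : List String) : List Int :=
  let n := (PySem.Set.ofList gems).length
  let st := (PySem.List.enumerate gems 0).foldl (solutionAltStep n) (PySem.Dict.empty, 0, 100001)
  [st.2.1, st.2.2]

-- ===== PRECONDITION & SPEC =====
def Spec_solution (gems : List String) (out : List Int) : Prop := out = solution_alt gems
instance (gems : List String) (out : List Int) : Decidable (Spec_solution gems out) := by unfold Spec_solution; infer_instance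

-- ===== CLAIM (what is proved, stated in full; the proofs are below) =====
def Claim_equal_solution : Prop := ∀ (gems : List String), Dom_solution gems → Spec_solution gems (solution gems)

-- ===== LEMMAS AND PROOFS =====

-- ---- vocabulary: windows, type sets, dict abstractions ----

-- `w` contains every gem type occurring in `gems`
def pvFull (gems w : List String) : Prop := ∀ g ∈ gems, g ∈ w

-- number of distinct gem types in `w`
def pvDcount (w : List String) : Nat := (PySem.List.dedup w).length

-- `d` is the counting dict of the window `w`
def pvApprox (w : List String) (d : PySem.Dict String Int) : Prop :=
  d.keys.Nodup ∧ (∀ g, g ∈ d.keys ↔ g ∈ w) ∧ ∀ g, d.getD g 0 = (w.count g : Int)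

-- index of the last occurrence of `g` in `p` (junk when `g ∉ p`)
def pvLastIdx : List String → String → Nat
  | [], _ => 0
  | _ :: w, g => if g ∈ w then pvLastIdx w g + 1 else 0

-- the last-occurrence dict built by B over the prefix `p`
def pvLastD (p : List String) : PySem.Dict String Int :=
  (PySem.List.enumerate p 0).foldl (fun d rg => d.insert rg.2 rg.1) PySem.Dict.empty

-- A's final minimum-taking fold
def pvAFold (ret : List (List Int)) : List Int :=
  ret.foldl
    (fun MAX data =>
      if PySem.List.pyGetD data 1 0 - PySem.List.pyGetD data 0 0 <
          PySem.List.pyGetD MAX 1 0 - PySem.List.pyGetD MAX 0 0 then data else MAX)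
    [0, 100001]

-- ---- tiny evaluation lemmas ----

theorem pvGetD_pair0 (a b : Int) : PySem.List.pyGetD [a, b] 0 0 = a := rfl
theorem pvGetD_pair1 (a b : Int) : PySem.List.pyGetD [a, b] 1 0 = b := rfl

theorem pvAFold_concat (ret : List (List Int)) (c0 c1 bs be : Int)
    (h : pvAFold ret = [bs, be]) :
    pvAFold (ret ++ [[c0, c1]]) = if c1 - c0 < be - bs then [c0, c1] else [bs, be] := by
  simp only [pvAFold, List.foldl_concat] at *
  rw [h]
  simp only [pvGetD_pair0, pvGetD_pair1]
  rfl

-- ---- Dict.erase lemmas (not in the PySem cheat sheet) ----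

theorem pvKeysErase (d : PySem.Dict String Int) (k : String) :
    (d.erase k).keys = d.keys.filter (fun x => !(x == k)) := by
  show List.map _ (List.filter _ d.items) = List.filter _ (List.map _ d.items)
  induction d.items with
  | nil => rfl
  | cons p rest ih =>
    by_cases hp : p.1 = k <;> simp [List.map_cons, hp, ih]

theorem pvGet?EraseSelf (d : PySem.Dict String Int) (k : String) :
    (d.erase k).get? k = none := by
  rw [PySem.Dict.get?_eq_none_iff_not_mem_keys, pvKeysErase]
  simp

theorem pvGet?EraseNe (d : PySem.Dict String Int) (k g : String) (h : g ≠ k) :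
    (d.erase k).get? g = d.get? g := by
  show Option.map _ (List.find? _ (List.filter _ d.items)) = Option.map _ (List.find? _ d.items)
  congr 1
  induction d.items with
  | nil => rfl
  | cons p rest ih =>
    by_cases hp : p.1 = k
    · rw [List.filter_cons_of_neg (by simp [hp]),
        List.find?_cons_of_neg (by simp [hp]; exact fun hc => h hc.symm)]
      exact ih
    · rw [List.filter_cons_of_pos (by simp [hp])]
      by_cases hg : p.1 = g
      · rw [List.find?_cons_of_pos (by simp [hg]), List.find?_cons_of_pos (by simp [hg])]
      · rw [List.find?_cons_of_neg (by simp [hg]), List.find?_cons_of_neg (by simp [hg])]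
        exact ih

-- ---- pvApprox facts ----

theorem pvApprox_size {w : List String} {d : PySem.Dict String Int}
    (h : pvApprox w d) : d.size = pvDcount w := by
  have hk : d.size = d.keys.length := by
    simp [PySem.Dict.size, PySem.Dict.keys]
  rw [hk]
  exact ((List.perm_ext_iff_of_nodup h.1 (PySem.List.nodup_dedup w)).2
    (fun a => (h.2.1 a).trans (PySem.List.mem_dedup w a).symm)).length_eq

theorem pvApprox_counter (p : List String) : pvApprox p (PySem.Dict.counter p) := by
  refine ⟨PySem.Dict.nodup_keys_counter p, fun g => ?_, fun g => PySem.Dict.getD_counter p g⟩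
  rw [PySem.Dict.keys_counter]
  exact PySem.Set.mem_ofList p g

theorem pvApprox_add {w : List String} {d : PySem.Dict String Int}
    (h : pvApprox w d) (x : String) : pvApprox (w ++ [x]) (d.modify x 0 (· + 1)) := by
  obtain ⟨hnd, hmem, hcnt⟩ := h
  rw [PySem.Dict.modify]
  refine ⟨PySem.Dict.nodup_keys_insert _ _ _ hnd, fun g => ?_, fun g => ?_⟩
  · rw [PySem.Dict.mem_keys_insert]
    rw [hmem g]
    simp [eq_comm]
    tauto
  · rw [PySem.Dict.getD_insert]
    by_cases hg : g = x
    · subst hg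
      rw [if_pos rfl, hcnt g]
      simp [List.count_append]
    · rw [if_neg hg, hcnt g]
      have : ¬ x = g := fun hc => hg hc.symm
      simp [List.count_append, this]


-- ---- removing the window head from the counting dict ----

theorem pvApprox_sub_mem {w : List String} {d : PySem.Dict String Int} {x : String}
    (h : pvApprox (x :: w) d) (hx : x ∈ w) :
    pvApprox w (d.modify x 0 (· - 1)) ∧ (d.modify x 0 (· - 1)).getD x 0 ≠ 0 := by
  obtain ⟨hnd, hmem, hcnt⟩ := h
  have hgd : ∀ g, (d.modify x 0 (· - 1)).getD g 0 = (w.count g : Int) := by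
    intro g
    rw [PySem.Dict.modify, PySem.Dict.getD_insert]
    by_cases hg : g = x
    · subst hg
      rw [if_pos rfl, hcnt g, List.count_cons_self]
      push_cast
      ring
    · rw [if_neg hg, hcnt g, List.count_cons_of_ne (fun hc => hg hc.symm)]
  refine ⟨⟨PySem.Dict.nodup_keys_insert _ _ _ hnd, fun g => ?_, hgd⟩, ?_⟩
  · rw [PySem.Dict.modify, PySem.Dict.mem_keys_insert, hmem g]
    constructor
    · rintro (rfl | hg)
      · exact hx
      · rcases List.mem_cons.1 hg with rfl | hg
        · exact hx
        · exact hg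
    · intro hg
      exact Or.inr (List.mem_cons_of_mem _ hg)
  · rw [hgd x]
    have : 0 < w.count x := List.count_pos_iff.2 hx
    omega

theorem pvApprox_sub_not_mem {w : List String} {d : PySem.Dict String Int} {x : String}
    (h : pvApprox (x :: w) d) (hx : x ∉ w) :
    (d.modify x 0 (· - 1)).getD x 0 = 0 ∧
      pvApprox w ((d.modify x 0 (· - 1)).erase x) := by
  obtain ⟨hnd, hmem, hcnt⟩ := h
  have hcw : w.count x = 0 := List.count_eq_zero.2 hx
  have hgd : ∀ g, (d.modify x 0 (· - 1)).getD g 0 = ((x :: w).count g : Int) - (if g = x then 1 else 0) := by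
    intro g
    rw [PySem.Dict.modify, PySem.Dict.getD_insert]
    by_cases hg : g = x
    · subst hg
      rw [if_pos rfl, if_pos rfl, hcnt g]
    · rw [if_neg hg, if_neg hg, hcnt g]
      ring
  have hzero : (d.modify x 0 (· - 1)).getD x 0 = 0 := by
    rw [hgd x, if_pos rfl, List.count_cons_self, hcw]
    push_cast
  have hndm : (d.modify x 0 (· - 1)).keys.Nodup := PySem.Dict.nodup_keys_insert _ _ _ hnd
  refine ⟨hzero, ⟨?_, fun g => ?_, fun g => ?_⟩⟩
  · rw [pvKeysErase]
    exact hndm.filter _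
  · rw [pvKeysErase, List.mem_filter]
    rw [PySem.Dict.modify, PySem.Dict.mem_keys_insert, hmem g]
    constructor
    · rintro ⟨(rfl | hg), hne⟩
      · simp at hne
      · by_cases hgx : g = x
        · simp [hgx] at hne
        · rcases List.mem_cons.1 hg with rfl | hg
          · exact absurd rfl hgx
          · exact hg
    · intro hg
      have hgx : g ≠ x := fun hc => hx (hc ▸ hg)
      exact ⟨Or.inr (List.mem_cons_of_mem _ hg), by simp [hgx]⟩
  · by_cases hg : g = x
    · subst hg
      rw [PySem.Dict.getD_eq_get?_getD, pvGet?EraseSelf]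
      simp [hcw]
    · rw [PySem.Dict.getD_eq_get?_getD, pvGet?EraseNe _ _ _ hg, ← PySem.Dict.getD_eq_get?_getD,
        hgd g, if_neg hg, List.count_cons_of_ne (fun hc => hg hc.symm)]
      ring

-- ---- pvFull / pvDcount ----

theorem pvFull_append {gems w : List String} (h : pvFull gems w) (x : String) :
    pvFull gems (w ++ [x]) :=
  fun g hg => List.mem_append_left _ (h g hg)

theorem pvDcount_perm_sub {w gems : List String} (hsub : w ⊆ gems) :
    (PySem.List.dedup w).Subperm (PySem.List.dedup gems) := by
  refine List.subperm_of_subset (PySem.List.nodup_dedup w) (fun a ha => ?_)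
  rw [PySem.List.mem_dedup]
  exact hsub ((PySem.List.mem_dedup w a).1 ha)

theorem pvDcount_le {w gems : List String} (hsub : w ⊆ gems) :
    pvDcount w ≤ pvDcount gems :=
  (pvDcount_perm_sub hsub).length_le

theorem pvFull_iff_dcount {gems w : List String} (hsub : w ⊆ gems) :
    pvFull gems w ↔ pvDcount w = pvDcount gems := by
  constructor
  · intro hfull
    exact ((List.perm_ext_iff_of_nodup (PySem.List.nodup_dedup w) (PySem.List.nodup_dedup gems)).2
      (fun a => by
        rw [PySem.List.mem_dedup, PySem.List.mem_dedup]
        exact ⟨fun ha => hsub ha, fun ha => hfull a ha⟩)).length_eq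
  · intro hlen g hg
    have hperm := (pvDcount_perm_sub hsub).perm_of_length_le (le_of_eq hlen.symm)
    have hdg : g ∈ PySem.List.dedup gems := (PySem.List.mem_dedup gems g).2 hg
    exact (PySem.List.mem_dedup w g).1 (hperm.mem_iff.mpr hdg)

theorem pvDcount_lt {gems w : List String} (hsub : w ⊆ gems) (h : ¬ pvFull gems w) :
    pvDcount w < pvDcount gems :=
  lt_of_le_of_ne (pvDcount_le hsub) (fun hc => h ((pvFull_iff_dcount hsub).2 hc))

-- ---- pvLastIdx ----

theorem pvMemDropIff {p : List String} {g : String} (h : g ∈ p) (L : Nat) :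
    g ∈ p.drop L ↔ L ≤ pvLastIdx p g := by
  induction p generalizing L with
  | nil => cases h
  | cons x w ih =>
    cases L with
    | zero => simpa using h
    | succ L =>
      rw [List.drop_succ_cons, pvLastIdx]
      by_cases hw : g ∈ w
      · rw [if_pos hw, ih hw]
        omega
      · rw [if_neg hw]
        constructor
        · intro hc
          exact absurd (List.mem_of_mem_drop hc) hw
        · omega

theorem pvLastIdx_append {p : List String} {g x : String} (h : g ∈ p ∨ g = x) :
    pvLastIdx (p ++ [x]) g = if g = x then p.length else pvLastIdx p g := by
  induction p with
  | nil =>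
    rcases h with h | rfl
    · cases h
    · simp [pvLastIdx]
  | cons a p' ih =>
    rw [List.cons_append, pvLastIdx]
    by_cases hgx : g = x
    · rw [if_pos (by simp [hgx]), ih (Or.inr hgx), if_pos hgx, if_pos hgx]
      simp
    · have hg : g ∈ a :: p' := by
        rcases h with h | h
        · exact h
        · exact absurd h hgx
      rw [if_neg hgx,
        show pvLastIdx (a :: p') g = if g ∈ p' then pvLastIdx p' g + 1 else 0 from rfl]
      by_cases hp' : g ∈ p'
      · rw [if_pos (by simp [hp']), ih (Or.inl hp'), if_neg hgx, if_pos hp']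
      · rw [if_neg (by simp [hp', hgx]), if_neg hp']

-- ---- pvLastD ----

theorem pvLastD_append (p : List String) (x : String) :
    pvLastD (p ++ [x]) = (pvLastD p).insert x (p.length : Int) := by
  rw [pvLastD, pvLastD, PySem.List.enumerate_append, List.foldl_append,
    PySem.List.enumerate_cons, PySem.List.enumerate_nil]
  simp only [List.foldl_cons, List.foldl_nil, zero_add]

theorem pvLastD_keys (p : List String) : (pvLastD p).keys = PySem.Set.ofList p := by
  have h := PySem.Dict.keys_foldl_insert_key (ν := Int) (PySem.List.enumerate p 0)
    (fun rg => rg.2) (fun _ rg => rg.1) PySem.Dict.empty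
  simp only [PySem.List.map_snd_enumerate] at h
  rw [pvLastD]
  exact h.trans (PySem.Set.update_nil_left p)

theorem pvLastD_nodup (p : List String) : (pvLastD p).keys.Nodup := by
  rw [pvLastD]
  exact PySem.Dict.nodup_keys_foldl_insert_key _ (fun (rg : Int × String) => rg.2)
    (fun _ (rg : Int × String) => rg.1) _ List.nodup_nil

theorem pvLastD_size (p : List String) : (pvLastD p).size = pvDcount p := by
  have : (pvLastD p).size = (pvLastD p).keys.length := by
    simp [PySem.Dict.size, PySem.Dict.keys]
  rw [this, pvLastD_keys, pvDcount, PySem.List.dedup_eq_ofList]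

theorem pvLastD_get? {p : List String} {g : String} (h : g ∈ p) :
    (pvLastD p).get? g = some ((pvLastIdx p g : Nat) : Int) := by
  induction p using List.reverseRecOn with
  | nil => cases h
  | append_singleton p x ih =>
    rw [pvLastD_append, PySem.Dict.get?_insert]
    by_cases hgx : g = x
    · rw [if_pos hgx, pvLastIdx_append (Or.inr hgx), if_pos hgx]
    · have hp : g ∈ p := by
        rcases List.mem_append.1 h with h | h
        · exact h
        · simp at h
          exact absurd h hgx
      rw [if_neg hgx, ih hp, pvLastIdx_append (Or.inl hp), if_neg hgx]

-- ---- the minimum of B's last-occurrence values ----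

theorem pvLastD_min {gems p : List String} (hsub : p ⊆ gems) (hfull : pvFull gems p)
    {m : Nat} (h1 : pvFull gems (p.drop m)) (h2 : ¬ pvFull gems (p.drop (m + 1))) :
    PySem.List.min? (pvLastD p).values (fun v => v) = some ((m : Nat) : Int) := by
  have hvals : (pvLastD p).values = (pvLastD p).keys.map (fun k => (pvLastD p).getD k 0) :=
    PySem.Dict.values_eq_map_keys _ (pvLastD_nodup p) 0
  have hkey : ∀ g ∈ (pvLastD p).keys, g ∈ p := fun g hg => by
    rw [pvLastD_keys] at hg
    exact (PySem.Set.mem_ofList p g).1 hg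
  have hgetD : ∀ g ∈ p, (pvLastD p).getD g 0 = (pvLastIdx p g : Int) := fun g hg => by
    rw [PySem.Dict.getD_eq_get?_getD, pvLastD_get? hg]
    rfl
  have hlow : ∀ v ∈ (pvLastD p).values, (m : Int) ≤ v := by
    intro v hv
    rw [hvals] at hv
    obtain ⟨g, hg, rfl⟩ := List.mem_map.1 hv
    have hgp := hkey g hg
    have hgm : g ∈ p.drop m := h1 g (hsub hgp)
    rw [hgetD g hgp]
    exact_mod_cast (pvMemDropIff hgp m).1 hgm
  have hmem : ((m : Nat) : Int) ∈ (pvLastD p).values := by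
    rw [pvFull] at h2
    push Not at h2
    obtain ⟨g0, hg0gems, hnot⟩ := h2
    have hg0p : g0 ∈ p := hfull g0 hg0gems
    have hge : m ≤ pvLastIdx p g0 := (pvMemDropIff hg0p m).1 (h1 g0 hg0gems)
    have hlt : ¬ (m + 1 ≤ pvLastIdx p g0) := fun hc => hnot ((pvMemDropIff hg0p (m + 1)).2 hc)
    have heq : pvLastIdx p g0 = m := by omega
    rw [hvals]
    refine List.mem_map.2 ⟨g0, ?_, ?_⟩
    · rw [pvLastD_keys]
      exact (PySem.Set.mem_ofList p g0).2 hg0p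
    · rw [hgetD g0 hg0p, heq]
  cases hmin : PySem.List.min? (pvLastD p).values (fun v => v) with
  | none =>
    rw [PySem.List.min?_eq_none_iff] at hmin
    rw [hmin] at hmem
    cases hmem
  | some m' =>
    have hle : m' ≤ ((m : Nat) : Int) := PySem.List.min?_isMin hmin _ hmem
    have hge : ((m : Nat) : Int) ≤ m' := hlow m' (PySem.List.min?_mem hmin)
    rw [le_antisymm hle hge]

-- ---- the inner while-loop of A ----

theorem pvShrink (gems : List String) (n : Nat) (hn : n = pvDcount gems)
    (k : Nat) (hk : k ≤ gems.length) :
    ∀ fuel L (d : PySem.Dict String Int) (flag : Bool), L < k → k - L + 1 ≤ fuel →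
    pvApprox ((gems.take k).drop L) d →
    pvFull gems ((gems.take k).drop L) →
    ∃ d2 L2, solutionShrink gems n fuel (d, L, flag) = (d2, L2, true) ∧
      L < L2 ∧ L2 ≤ k ∧
      pvFull gems ((gems.take k).drop (L2 - 1)) ∧
      ¬ pvFull gems ((gems.take k).drop L2) ∧
      pvApprox ((gems.take k).drop L2) d2 := by
  intro fuel
  induction fuel with
  | zero =>
    intro L d flag hLk hf _ _
    omega
  | succ f ih =>
    intro L d flag hLk hf happ hfull
    have hkl : (gems.take k).length = k := by
      rw [List.length_take]
      omega
    have hLN : L < gems.length := lt_of_lt_of_le hLk hk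
    have hwin : (gems.take k).drop L = gems[L] :: (gems.take k).drop (L + 1) := by
      rw [List.drop_eq_getElem_cons (by omega : L < (gems.take k).length)]
      congr 1
      exact List.getElem_take
    have hwsub : ∀ j : Nat, ((gems.take k).drop j) ⊆ gems :=
      fun j a ha => List.take_subset k gems ((List.drop_sublist j (gems.take k)).subset ha)
    have hsize : d.size = n := by
      rw [pvApprox_size happ, hn]
      exact (pvFull_iff_dcount (hwsub L)).1 hfull
    have hget : PySem.List.pyGet? gems (L : Int) = some gems[L] := by
      rw [PySem.List.pyGet?_natCast]
      exact List.getElem?_eq_getElem hLN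
    rw [hwin] at happ
    by_cases hx : gems[L] ∈ (gems.take k).drop (L + 1)
    · -- the window stays full: one more pass
      obtain ⟨happ', hnz⟩ := pvApprox_sub_mem happ hx
      have hfull' : pvFull gems ((gems.take k).drop (L + 1)) := by
        intro t ht
        have hmem := hfull t ht
        rw [hwin] at hmem
        rcases List.mem_cons.1 hmem with rfl | h
        · exact hx
        · exact h
      have hL1k : L + 1 < k := by
        have hlen : 0 < ((gems.take k).drop (L + 1)).length :=
          List.length_pos_of_ne_nil (List.ne_nil_of_mem hx)
        rw [List.length_drop, hkl] at hlen
        omega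
      obtain ⟨d2, L2, heq, hlt, hle, hf1, hf2, ha2⟩ :=
        ih (L + 1) (d.modify gems[L] 0 (· - 1)) true hL1k (by omega) happ' hfull'
      refine ⟨d2, L2, ?_, by omega, hle, hf1, hf2, ha2⟩
      rw [solutionShrink, if_pos hsize, hget]
      simp only [if_neg hnz]
      exact heq
    · -- gems[L] leaves the window for good: the loop exits after this pass
      obtain ⟨hz, happ'⟩ := pvApprox_sub_not_mem happ hx
      have hnfull : ¬ pvFull gems ((gems.take k).drop (L + 1)) :=
        fun hc => hx (hc gems[L] (List.getElem_mem hLN))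
      have hsz2 : ((d.modify gems[L] 0 (· - 1)).erase gems[L]).size ≠ n := by
        rw [pvApprox_size happ', hn]
        exact Nat.ne_of_lt (pvDcount_lt (hwsub (L + 1)) hnfull)
      obtain ⟨f', rfl⟩ : ∃ f', f = f' + 1 := ⟨f - 1, by omega⟩
      refine ⟨(d.modify gems[L] 0 (· - 1)).erase gems[L], L + 1, ?_, by omega, by omega, ?_, hnfull, happ'⟩
      · rw [solutionShrink, if_pos hsize, hget]
        simp only [if_pos hz]
        rw [solutionShrink, if_neg hsz2]
      · rw [Nat.add_sub_cancel]
        rw [hwin]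
        intro t ht
        have hmem := hfull t ht
        rw [hwin] at hmem
        exact hmem

-- ---- the joint loop invariant and goal ----

def pvInv (gems : List String) (n R : Nat) (d : PySem.Dict String Int) (L : Nat)
    (ret : List (List Int)) (bs be : Int) : Prop :=
  (pvDcount (gems.take R) < n ∧ d = PySem.Dict.counter (gems.take R) ∧ L = 0 ∧ ret = []) ∨
  (pvDcount (gems.take R) = n ∧ 1 ≤ L ∧ L ≤ R ∧
    pvFull gems ((gems.take R).drop (L - 1)) ∧
    ¬ pvFull gems ((gems.take R).drop L) ∧
    pvApprox ((gems.take R).drop L) d ∧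
    be - bs ≤ (R : Int) - (L : Int) + 1)

def pvGoal (gems : List String) (n R : Nat) (d : PySem.Dict String Int) (L : Nat)
    (ret : List (List Int)) (bs be : Int) : Prop :=
  pvAFold (solutionLoop gems n R d L ret false) =
    [((PySem.List.enumerate (gems.drop R) (R : Int)).foldl (solutionAltStep n)
        (pvLastD (gems.take R), bs, be)).2.1,
      ((PySem.List.enumerate (gems.drop R) (R : Int)).foldl (solutionAltStep n)
        (pvLastD (gems.take R), bs, be)).2.2]

-- ---- per-index decompositions ----

theorem pvTakeStep (gems : List String) {R : Nat} (hRlt : R < gems.length) :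
    gems.take (R + 1) = gems.take R ++ [gems[R]] := by
  rw [List.take_add_one, List.getElem?_eq_getElem hRlt]
  rfl

theorem pvEnumStep (gems : List String) {R : Nat} (hRlt : R < gems.length) :
    PySem.List.enumerate (gems.drop R) (R : Int) =
      ((R : Int), gems[R]) :: PySem.List.enumerate (gems.drop (R + 1)) (((R + 1 : Nat)) : Int) := by
  rw [List.drop_eq_getElem_cons hRlt, PySem.List.enumerate_cons]
  norm_num

theorem pvLastDStep (gems : List String) {R : Nat} (hRlt : R < gems.length) :
    (pvLastD (gems.take R)).insert gems[R] (R : Int) = pvLastD (gems.take (R + 1)) := by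
  rw [pvTakeStep gems hRlt, pvLastD_append, List.length_take, Nat.min_eq_left (by omega)]

-- ---- one outer-loop step in which the window becomes full (A shrinks, both record) ----

theorem pvFullStep (gems : List String) (n : Nat) (hn : n = pvDcount gems)
    {m R L : Nat} (d : PySem.Dict String Int) (ret : List (List Int)) (bs be : Int)
    (hm : gems.length - R = m + 1) (hRlt : R < gems.length) (hL : L < R + 1)
    (hfold : pvAFold ret = [bs, be])
    (hguard : d.size < n)
    (happ1 : pvApprox ((gems.take (R + 1)).drop L) (d.modify gems[R] 0 (· + 1)))
    (hfull1 : pvFull gems ((gems.take (R + 1)).drop L))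
    (ih : ∀ (R' : Nat) (d' : PySem.Dict String Int) (L' : Nat) (ret' : List (List Int)) (bs' be' : Int),
      gems.length - R' = m → R' ≤ gems.length → pvAFold ret' = [bs', be'] →
      pvInv gems n R' d' L' ret' bs' be' → pvGoal gems n R' d' L' ret' bs' be') :
    pvGoal gems n R d L ret bs be := by
  obtain ⟨d2, L2, heq, hlt, hle, hfa, hfb, ha2⟩ :=
    pvShrink gems n hn (R + 1) hRlt (gems.length + 1) L (d.modify gems[R] 0 (· + 1)) false
      hL (by omega) happ1 hfull1
  have hfold' := pvAFold_concat ret (L2 : Int) ((R : Int) + 1) bs be hfold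
  have hsub1 : gems.take (R + 1) ⊆ gems := List.take_subset _ _
  have hfullp : pvFull gems (gems.take (R + 1)) :=
    fun t ht => List.drop_subset L (gems.take (R + 1)) (hfull1 t ht)
  have hdceq : pvDcount (gems.take (R + 1)) = n := by
    rw [hn]
    exact (pvFull_iff_dcount hsub1).1 hfullp
  have hBsize : (pvLastD (gems.take (R + 1))).size = n := by
    rw [pvLastD_size, hdceq]
  have hfb' : ¬ pvFull gems ((gems.take (R + 1)).drop ((L2 - 1) + 1)) := by
    rw [show L2 - 1 + 1 = L2 by omega]
    exact hfb
  have hmin := pvLastD_min hsub1 hfullp hfa hfb'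
  have hcast1 : ((L2 - 1 : Nat) : Int) = (L2 : Int) - 1 := by omega
  -- A's one step
  unfold pvGoal
  rw [solutionLoop, dif_pos hRlt]
  simp only [if_pos hguard, heq, if_pos]
  -- B's one step
  rw [pvEnumStep gems hRlt]
  simp only [List.foldl_cons]
  have hstep : solutionAltStep n (pvLastD (gems.take R), bs, be) ((R : Int), gems[R]) =
      (pvLastD (gems.take (R + 1)),
        if (R : Int) + 1 - (L2 : Int) < be - bs then (L2 : Int) else bs,
        if (R : Int) + 1 - (L2 : Int) < be - bs then (R : Int) + 1 else be) := by
    simp only [solutionAltStep]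
    rw [pvLastDStep gems hRlt, if_pos hBsize, hmin]
    simp only [hcast1]
    by_cases hcond : (R : Int) + 1 - (L2 : Int) < be - bs
    · rw [if_pos (by omega), if_pos hcond, if_pos hcond]
      have : (L2 : Int) - 1 + 1 = (L2 : Int) := by ring
      rw [this]
    · rw [if_neg (by omega), if_neg hcond, if_neg hcond]
  rw [hstep]
  by_cases hcond : (R : Int) + 1 - (L2 : Int) < be - bs
  · rw [if_pos hcond, if_pos hcond]
    have happly := ih (R + 1) d2 L2 (ret ++ [[(L2 : Int), (R : Int) + 1]]) (L2 : Int) ((R : Int) + 1)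
      (by omega) (by omega)
      (by rw [hfold', if_pos hcond])
      (Or.inr ⟨hdceq, by omega, hle, hfa, hfb, ha2, by push_cast; omega⟩)
    unfold pvGoal at happly
    rw [show (((R + 1 : Nat)) : Int) = (R : Int) + 1 by push_cast; ring] at happly
    exact happly
  · rw [if_neg hcond, if_neg hcond]
    have happly := ih (R + 1) d2 L2 (ret ++ [[(L2 : Int), (R : Int) + 1]]) bs be
      (by omega) (by omega)
      (by rw [hfold', if_neg hcond])
      (Or.inr ⟨hdceq, by omega, hle, hfa, hfb, ha2, by push_cast; omega⟩)
    unfold pvGoal at happly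
    rw [show (((R + 1 : Nat)) : Int) = (R : Int) + 1 by push_cast; ring] at happly
    exact happly

-- ---- the main joint induction over the outer loop ----

theorem pvMain (gems : List String) (n : Nat) (hn : n = pvDcount gems) :
    ∀ (m R : Nat) (d : PySem.Dict String Int) (L : Nat) (ret : List (List Int)) (bs be : Int),
    gems.length - R = m → R ≤ gems.length → pvAFold ret = [bs, be] →
    pvInv gems n R d L ret bs be → pvGoal gems n R d L ret bs be := by
  intro m
  induction m with
  | zero =>
    intro R d L ret bs be hm hR hfold _
    have hRN : R = gems.length := by omega
    subst hRN
    unfold pvGoal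
    rw [List.drop_length, solutionLoop, dif_neg (lt_irrefl _)]
    simp only [PySem.List.enumerate_nil, List.foldl_nil]
    exact hfold
  | succ m ih =>
    intro R d L ret bs be hm hR hfold hinv
    have hRlt : R < gems.length := by omega
    have hlenR : (gems.take R).length = R := by
      rw [List.length_take]
      omega
    have htake := pvTakeStep gems hRlt
    rcases hinv with ⟨hdc, hd, hL0, hret⟩ | ⟨hdc, hL1, hLR, hfulldrop, hnfull, happ, hbb⟩
    · -- all types not yet seen before this step
      have hguard : d.size < n := by
        rw [hd, pvApprox_size (pvApprox_counter _)]
        exact hdc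
      have hd1 : d.modify gems[R] 0 (· + 1) = PySem.Dict.counter (gems.take (R + 1)) := by
        rw [hd, htake, PySem.Dict.counter_append_singleton]
      have happ1 : pvApprox (gems.take (R + 1)) (d.modify gems[R] 0 (· + 1)) := by
        rw [hd1]
        exact pvApprox_counter _
      subst hL0
      by_cases hfl : pvFull gems (gems.take (R + 1))
      · exact pvFullStep gems n hn d ret bs be hm hRlt (by omega) hfold hguard happ1 hfl ih
      · have hdc1 : pvDcount (gems.take (R + 1)) < n := by
          rw [hn]
          exact pvDcount_lt (List.take_subset _ _) hfl
        have hsz1 : (d.modify gems[R] 0 (· + 1)).size ≠ n := by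
          rw [pvApprox_size happ1]
          omega
        have hsh : solutionShrink gems n (gems.length + 1) (d.modify gems[R] 0 (· + 1), 0, false) =
            (d.modify gems[R] 0 (· + 1), 0, false) := by
          rw [solutionShrink, if_neg hsz1]
        have hstep : solutionAltStep n (pvLastD (gems.take R), bs, be) ((R : Int), gems[R]) =
            (pvLastD (gems.take (R + 1)), bs, be) := by
          simp only [solutionAltStep]
          rw [pvLastDStep gems hRlt]
          rw [if_neg (by rw [pvLastD_size]; omega)]
        unfold pvGoal
        rw [solutionLoop, dif_pos hRlt]
        simp only [if_pos hguard, hsh, Bool.false_eq_true, if_false]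
        rw [pvEnumStep gems hRlt]
        simp only [List.foldl_cons]
        rw [hstep]
        have happly := ih (R + 1) (d.modify gems[R] 0 (· + 1)) 0 ret bs be (by omega) (by omega)
          hfold (Or.inl ⟨hdc1, hd1, rfl, hret⟩)
        unfold pvGoal at happly
        rw [show (((R + 1 : Nat)) : Int) = (R : Int) + 1 by push_cast; ring] at happly
        exact happly
    · -- all types already seen: the sliding window phase
      have hwsub : ∀ (p : List String) (j : Nat), (p.take (R + 1)).drop j ⊆ p :=
        fun p j a ha => List.take_subset _ p (List.drop_subset j (p.take (R + 1)) ha)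
      have hwsubR : (gems.take R).drop L ⊆ gems :=
        fun a ha => List.take_subset _ gems (List.drop_subset L (gems.take R) ha)
      have hguard : d.size < n := by
        rw [pvApprox_size happ, hn]
        exact pvDcount_lt hwsubR hnfull
      have hdropwin : (gems.take (R + 1)).drop L = (gems.take R).drop L ++ [gems[R]] := by
        rw [htake, List.drop_append_of_le_length (by omega)]
      have happ1 : pvApprox ((gems.take (R + 1)).drop L) (d.modify gems[R] 0 (· + 1)) := by
        rw [hdropwin]
        exact pvApprox_add happ gems[R]
      by_cases hw : pvFull gems ((gems.take (R + 1)).drop L)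
      · exact pvFullStep gems n hn d ret bs be hm hRlt (by omega) hfold hguard happ1 hw ih
      · have hsz1 : (d.modify gems[R] 0 (· + 1)).size ≠ n := by
          rw [pvApprox_size happ1, hn]
          exact Nat.ne_of_lt (pvDcount_lt (hwsub gems L) hw)
        have hfullpR : pvFull gems (gems.take R) := by
          refine (pvFull_iff_dcount (List.take_subset _ _)).2 ?_
          rw [← hn]
          exact hdc
        have hfullp1 : pvFull gems (gems.take (R + 1)) := by
          rw [htake]
          exact pvFull_append hfullpR gems[R]
        have hBsize : (pvLastD (gems.take (R + 1))).size = n := by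
          rw [pvLastD_size, hn]
          exact (pvFull_iff_dcount (List.take_subset _ _)).1 hfullp1
        have hfa1 : pvFull gems ((gems.take (R + 1)).drop (L - 1)) := by
          rw [htake, List.drop_append_of_le_length (by omega)]
          exact pvFull_append hfulldrop gems[R]
        have hfb1 : ¬ pvFull gems ((gems.take (R + 1)).drop ((L - 1) + 1)) := by
          rw [show L - 1 + 1 = L by omega]
          exact hw
        have hmin := pvLastD_min (List.take_subset _ _) hfullp1 hfa1 hfb1
        have hsh : solutionShrink gems n (gems.length + 1) (d.modify gems[R] 0 (· + 1), L, false) =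
            (d.modify gems[R] 0 (· + 1), L, false) := by
          rw [solutionShrink, if_neg hsz1]
        have hstep : solutionAltStep n (pvLastD (gems.take R), bs, be) ((R : Int), gems[R]) =
            (pvLastD (gems.take (R + 1)), bs, be) := by
          simp only [solutionAltStep]
          rw [pvLastDStep gems hRlt, if_pos hBsize, hmin]
          have hcastL : ((L - 1 : Nat) : Int) = (L : Int) - 1 := by omega
          simp only [hcastL]
          rw [if_neg (by omega)]
        unfold pvGoal
        rw [solutionLoop, dif_pos hRlt]
        simp only [if_pos hguard, hsh, Bool.false_eq_true, if_false]
        rw [pvEnumStep gems hRlt]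
        simp only [List.foldl_cons]
        rw [hstep]
        have happly := ih (R + 1) (d.modify gems[R] 0 (· + 1)) L ret bs be (by omega) (by omega)
          hfold (Or.inr ⟨by
              rw [hn]
              exact (pvFull_iff_dcount (List.take_subset _ _)).1 hfullp1,
            hL1, by omega, hfa1, hw, happ1, by push_cast; omega⟩)
        unfold pvGoal at happly
        rw [show (((R + 1 : Nat)) : Int) = (R : Int) + 1 by push_cast; ring] at happly
        exact happly

-- ===== VERDICT (by name: the statement is the Claim_ definition above) =====
theorem solution_spec : Claim_equal_solution := by
  unfold Claim_equal_solution
  intro gems _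
  unfold Spec_solution
  by_cases hne : gems = []
  · subst hne
    show pvAFold (solutionLoop [] (PySem.Set.ofList ([] : List String)).length 0
        PySem.Dict.empty 0 [] false) = solution_alt []
    rw [solutionLoop, dif_neg (by simp : ¬ (0 : Nat) < ([] : List String).length)]
    rfl
  · have hnpos : 0 < pvDcount gems := by
      obtain ⟨g, gs, rfl⟩ := List.exists_cons_of_ne_nil hne
      have : g ∈ PySem.List.dedup (g :: gs) := (PySem.List.mem_dedup _ g).2 (List.mem_cons_self)
      exact List.length_pos_of_ne_nil (List.ne_nil_of_mem this)
    have hn : (PySem.Set.ofList gems).length = pvDcount gems := by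
      rw [pvDcount, PySem.List.dedup_eq_ofList]
    have hmain := pvMain gems (PySem.Set.ofList gems).length hn gems.length 0
      PySem.Dict.empty 0 [] 0 100001 (by omega) (by omega) rfl
      (Or.inl ⟨by simpa [pvDcount] using hnpos.trans_le (le_of_eq hn.symm), rfl, rfl, rfl⟩)
    unfold pvGoal at hmain
    show pvAFold (solutionLoop gems (PySem.Set.ofList gems).length 0 PySem.Dict.empty 0 [] false) = _
    rw [hmain]
    rfl
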